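-- pv_equiv track=rewrite | github.com/yfh667/generic | draw/basic_show/get_satellite_block_info.py | get_satellite_block_info
-- ===== SOURCE A (Python) =====
-- def cyclic_width(ys, N):
--     if not ys:
--         return 0
--     ys = sorted(set(ys))
--     gaps = []
--     for i in range(1, len(ys)):
--         gaps.append(ys[i] - ys[i-1])
--     # 跨越环首尾
--     gaps.append((ys[0] + N) - ys[-1])
--     maxgap = max(gaps)
--     return N - maxgap + 1
--
-- def get_satellite_block_info(sats, P, N):
--     xs = [sid // N for sid in sats]
--     ys = [sid % N for sid in sats]
--
--     left = min(xs)
--     right = max(xs)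
--     block_info = [(None, None), (None, None)]
--
--     # 判断是否两块
--     if left == 0 and right == P - 1:
--         # --------左侧块--------
--         leftgroup = []
--         x = left
--         while x in xs:
--             leftgroup.append(x)
--             x += 1
--         # 统计左块包络
--         leftys = [sid % N for sid in sats if (sid // N) in leftgroup]
--         left_width = cyclic_width(leftys, N)
--         left_length = leftgroup[-1] - leftgroup[0] + 1 if leftgroup else 0
--         block_info[0] = (left_length, left_width)
--
--         # --------右侧块--------
--         rightgroup = []
--         x = right
--         while x in xs:
--             rightgroup.append(x)
--             x -= 1
--         rightys = [sid % N for sid in sats if (sid // N) in rightgroup]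
--         right_width = cyclic_width(rightys, N)
--         right_length = rightgroup[0] - rightgroup[-1] + 1 if rightgroup else 0
--         block_info[1] = (right_length, right_width)
--
--     else:
--         # 只有一块，取所有点
--         w = max(xs) - min(xs) + 1
--         h = cyclic_width(ys, N)
--         block_info[0] = (w, h)
--         block_info[1] = (None, None)
--
--     return block_info  # [(块1长, 宽), (块2长, 宽)]
-- ===== SOURCE B (Python) =====
-- def cyclic_width(ys, N):
--     if not ys:
--         return 0
--     ys = sorted(set(ys))
--     gaps = []
--     for i in range(1, len(ys)):
--         gaps.append(ys[i] - ys[i-1])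
--     gaps.append((ys[0] + N) - ys[-1])
--     maxgap = max(gaps)
--     return N - maxgap + 1
--
-- def get_satellite_block_info(sats, P, N):
--     # one pass: index each column x = sid // N to the list of its ys = sid % N
--     pairs = [divmod(sid, N) for sid in sats]
--     idx = {}
--     for x, y in pairs:
--         idx.setdefault(x, []).append(y)
--     left = min(idx)
--     right = max(idx)
--     if left == 0 and right == P - 1:
--         k = 0
--         while k in idx:
--             k += 1
--         j = right
--         while j in idx:
--             j -= 1
--         leftys = [y for x in range(0, k) for y in idx.get(x, [])]
--         rightys = [y for x in range(j + 1, right + 1) for y in idx.get(x, [])]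
--         return [(k, cyclic_width(leftys, N)), (right - j, cyclic_width(rightys, N))]
--     else:
--         return [(right - left + 1, cyclic_width([y for _, y in pairs], N)), (None, None)]
-- ===== Notes on version B (the rewrite author's own statement) =====
-- stated objective: alternative
-- what changed: B replaces A's repeated scans of sats (list-membership while loops and two filtered re-scans) by one divmod pass building a dict from each column x=sid//N to its ys, then walks the runs by dict-key membership and gathers each block's ys by table lookup.
import Mathlib
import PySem

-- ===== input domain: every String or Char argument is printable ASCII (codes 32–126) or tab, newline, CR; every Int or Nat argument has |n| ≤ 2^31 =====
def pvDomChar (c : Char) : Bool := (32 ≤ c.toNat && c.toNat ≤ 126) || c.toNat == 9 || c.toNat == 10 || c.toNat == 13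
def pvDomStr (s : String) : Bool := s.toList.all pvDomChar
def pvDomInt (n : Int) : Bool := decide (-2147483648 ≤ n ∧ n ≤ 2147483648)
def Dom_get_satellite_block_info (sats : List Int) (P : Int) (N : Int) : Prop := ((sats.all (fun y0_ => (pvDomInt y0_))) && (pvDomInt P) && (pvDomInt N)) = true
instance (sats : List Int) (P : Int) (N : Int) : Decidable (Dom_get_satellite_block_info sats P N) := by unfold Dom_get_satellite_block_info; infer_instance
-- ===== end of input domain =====

-- B builds a dict from each column x = sid//N to its ys in one divmod pass and walks the
-- runs by dict-key membership, instead of A's repeated scans of sats (alternative algorithm).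

-- ===== PORT A =====
-- helper cyclic_width (module-level in Source A; Source B defines the identical helper, shared here)
def cyclic_width (ys : List Int) (N : Int) : Int :=
  if ys = [] then 0
  else
    let ys2 := PySem.List.sorted (PySem.Set.ofList ys) (fun v => v) false
    -- indices i, i-1 are always in range here, so pyGetD's default is never taken
    let gaps := (PySem.List.pyRange 1 (ys2.length : Int) 1).foldl
        (fun acc i => acc ++ [PySem.List.pyGetD ys2 i 0 - PySem.List.pyGetD ys2 (i-1) 0]) []
    let gaps2 := gaps ++ [(PySem.List.pyGetD ys2 0 0 + N) - PySem.List.pyGetD ys2 (-1) 0]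
    -- gaps2 ≠ [], so Python's max() cannot raise and .getD 0 is never the default
    let maxgap := (PySem.List.max? gaps2 (fun v => v)).getD 0
    N - maxgap + 1

-- 'x = left; while x in xs: leftgroup.append(x); x += 1'. The Python loop always terminates
-- (each successful iterate is a distinct member of xs), so fuel xs.length + 1 provably
-- suffices (lemma scanUp_lt'' below); the port is exact on every input.
def whileUpA (xs : List Int) : Nat → Int → List Int → List Int
  | 0, _, acc => acc
  | f+1, x, acc => if x ∈ xs then whileUpA xs f (x+1) (acc ++ [x]) else acc

-- 'x = right; while x in xs: rightgroup.append(x); x -= 1', same fuel argument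
def whileDownA (xs : List Int) : Nat → Int → List Int → List Int
  | 0, _, acc => acc
  | f+1, x, acc => if x ∈ xs then whileDownA xs f (x-1) (acc ++ [x]) else acc

def get_satellite_block_info (sats : List Int) (P : Int) (N : Int) : List (Option Int × Option Int) :=
  let xs := sats.map (fun sid => PySem.Int.floordiv sid N)
  let ys := sats.map (fun sid => PySem.Int.mod sid N)
  match PySem.List.min? xs (fun v => v), PySem.List.max? xs (fun v => v) with
  | some left, some right =>
    if left = 0 ∧ right = P - 1 then
      let leftgroup := whileUpA xs (xs.length + 1) left []
      let leftys := (sats.filter (fun sid => decide (PySem.Int.floordiv sid N ∈ leftgroup))).map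
          (fun sid => PySem.Int.mod sid N)
      let left_width := cyclic_width leftys N
      let left_length : Int :=
        if leftgroup ≠ [] then
          PySem.List.pyGetD leftgroup (-1) 0 - PySem.List.pyGetD leftgroup 0 0 + 1
        else 0
      let rightgroup := whileDownA xs (xs.length + 1) right []
      let rightys := (sats.filter (fun sid => decide (PySem.Int.floordiv sid N ∈ rightgroup))).map
          (fun sid => PySem.Int.mod sid N)
      let right_width := cyclic_width rightys N
      let right_length : Int :=
        if rightgroup ≠ [] then
          PySem.List.pyGetD rightgroup 0 0 - PySem.List.pyGetD rightgroup (-1) 0 + 1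
        else 0
      [(some left_length, some left_width), (some right_length, some right_width)]
    else
      -- Python recomputes max(xs), min(xs) here; xs ≠ [] under Pre_, the defaults are never taken
      let w := (PySem.List.max? xs (fun v => v)).getD 0 - (PySem.List.min? xs (fun v => v)).getD 0 + 1
      let h := cyclic_width ys N
      [(some w, some h), (none, none)]
  | _, _ => []   -- min() of the empty xs raises ValueError: excluded by Pre_

-- ===== PORT B =====
-- Source B's own (identical) module-level helper cyclic_width
def cyclic_width_alt (ys : List Int) (N : Int) : Int :=
  if ys = [] then 0
  else
    let ys2 := PySem.List.sorted (PySem.Set.ofList ys) (fun v => v) false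
    let gaps := (PySem.List.pyRange 1 (ys2.length : Int) 1).foldl
        (fun acc i => acc ++ [PySem.List.pyGetD ys2 i 0 - PySem.List.pyGetD ys2 (i-1) 0]) []
    let gaps2 := gaps ++ [(PySem.List.pyGetD ys2 0 0 + N) - PySem.List.pyGetD ys2 (-1) 0]
    let maxgap := (PySem.List.max? gaps2 (fun v => v)).getD 0
    N - maxgap + 1

-- 'k = 0; while k in idx: k += 1' — dict-key membership; same fuel argument as above
def scanUp (d : PySem.Dict Int (List Int)) : Nat → Int → Int
  | 0, x => x
  | f+1, x => if d.contains x then scanUp d f (x+1) else x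

-- 'j = right; while j in idx: j -= 1'
def scanDown (d : PySem.Dict Int (List Int)) : Nat → Int → Int
  | 0, x => x
  | f+1, x => if d.contains x then scanDown d f (x-1) else x

def get_satellite_block_info_alt (sats : List Int) (P : Int) (N : Int) : List (Option Int × Option Int) :=
  let pairs := sats.map (fun sid => (PySem.Int.floordiv sid N, PySem.Int.mod sid N))
  let idx := pairs.foldl (fun d p => d.modify p.1 [] (fun v => v ++ [p.2])) PySem.Dict.empty
  match PySem.List.min? idx.keys (fun v => v) with
  | none => []   -- min() of an empty dict raises ValueError: excluded by Pre_
  | some left =>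
    match PySem.List.max? idx.keys (fun v => v) with
    | none => []
    | some right =>
      if left = 0 ∧ right = P - 1 then
        let k := scanUp idx (PySem.Dict.size idx + 1) 0
        let j := scanDown idx (PySem.Dict.size idx + 1) right
        let leftys := (PySem.List.pyRange 0 k 1).foldl (fun acc x => acc ++ idx.getD x []) []
        let rightys := (PySem.List.pyRange (j+1) (right+1) 1).foldl (fun acc x => acc ++ idx.getD x []) []
        [(some k, some (cyclic_width_alt leftys N)), (some (right - j), some (cyclic_width_alt rightys N))]
      else
        [(some (right - left + 1), some (cyclic_width_alt (pairs.map (fun p => p.2)) N)), (none, none)]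

-- ===== PRECONDITION & SPEC =====
-- Python A raises ValueError (min of empty sequence) when sats = [] and
-- ZeroDivisionError when N = 0; those inputs are excluded.
def Pre_get_satellite_block_info (sats : List Int) (P : Int) (N : Int) : Prop :=
  sats ≠ [] ∧ N ≠ 0
instance (sats : List Int) (P : Int) (N : Int) : Decidable (Pre_get_satellite_block_info sats P N) := by
  unfold Pre_get_satellite_block_info; infer_instance
def pvWitness_get_satellite_block_info : List Int × Int × Int := ([0, 5], 2, 3)

def Spec_get_satellite_block_info (sats : List Int) (P : Int) (N : Int) (out : List (Option Int × Option Int)) : Prop := out = get_satellite_block_info_alt sats P N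
instance (sats : List Int) (P : Int) (N : Int) (out : List (Option Int × Option Int)) : Decidable (Spec_get_satellite_block_info sats P N out) := by unfold Spec_get_satellite_block_info; infer_instance

-- ===== CLAIM (what is proved, stated in full; the proofs are below) =====
def Claim_equal_get_satellite_block_info : Prop := ∀ (sats : List Int) (P : Int) (N : Int), Dom_get_satellite_block_info sats P N → Pre_get_satellite_block_info sats P N → Spec_get_satellite_block_info sats P N (get_satellite_block_info sats P N)

-- ===== LEMMAS AND PROOFS =====

-- scanUp specs
theorem scanUp_ge (d : PySem.Dict Int (List Int)) (f : Nat) (x : Int) : x ≤ scanUp d f x := by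
  induction f generalizing x with
  | zero => simp [scanUp]
  | succ f ih =>
    simp only [scanUp]
    split
    · have := ih (x+1); omega
    · omega

theorem scanUp_le (d : PySem.Dict Int (List Int)) (f : Nat) (x : Int) : scanUp d f x ≤ x + f := by
  induction f generalizing x with
  | zero => simp [scanUp]
  | succ f ih =>
    simp only [scanUp]
    split
    · have := ih (x+1); push_cast; omega
    · omega

theorem scanUp_mem (d : PySem.Dict Int (List Int)) (f : Nat) (x y : Int)
    (h1 : x ≤ y) (h2 : y < scanUp d f x) : d.contains y = true := by
  induction f generalizing x with
  | zero => simp [scanUp] at h2; omega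
  | succ f ih =>
    simp only [scanUp] at h2
    split at h2
    · rcases eq_or_lt_of_le h1 with rfl | h
      · assumption
      · exact ih (x+1) (by omega) h2
    · omega

theorem scanUp_not (d : PySem.Dict Int (List Int)) (f : Nat) (x : Int)
    (h : scanUp d f x < x + f) : d.contains (scanUp d f x) = false := by
  induction f generalizing x with
  | zero => simp [scanUp] at h
  | succ f ih =>
    by_cases hc : d.contains x
    · rw [scanUp, if_pos hc] at h ⊢
      exact ih (x+1) (by push_cast at h ⊢; omega)
    · rw [scanUp, if_neg hc]
      simpa using hc

-- fuel xs.length+1 suffices whenever every contained key lies in some list L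
theorem scanUp_lt'' (d : PySem.Dict Int (List Int)) (L : List Int)
    (hL : ∀ y, d.contains y = true → y ∈ L) (x : Int) :
    scanUp d (L.length + 1) x < x + (L.length + 1) := by
  by_contra hlt
  push_neg at hlt
  have hle := scanUp_le d (L.length + 1) x
  have heq : scanUp d (L.length + 1) x = x + ((L.length : Int) + 1) := by push_cast at hle ⊢; omega
  have hsub : PySem.List.pyRange x (x + ((L.length : Int) + 1)) 1 ⊆ L := by
    intro y hy
    rw [PySem.List.mem_pyRange_one] at hy
    exact hL y (scanUp_mem d (L.length + 1) x y hy.1 (by rw [heq]; exact hy.2))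
  have hlen := ((PySem.List.nodup_pyRange_one x (x + ((L.length : Int) + 1))).subperm hsub).length_le
  rw [PySem.List.length_pyRange_one] at hlen
  omega

theorem scanUp_unique (d : PySem.Dict Int (List Int)) (f1 f2 : Nat) (x : Int)
    (h1 : scanUp d f1 x < x + f1) (h2 : scanUp d f2 x < x + f2) :
    scanUp d f1 x = scanUp d f2 x := by
  rcases lt_trichotomy (scanUp d f1 x) (scanUp d f2 x) with h | h | h
  · have := scanUp_mem d f2 x _ (scanUp_ge d f1 x) h
    have := scanUp_not d f1 x h1
    simp_all
  · exact h
  · have := scanUp_mem d f1 x _ (scanUp_ge d f2 x) h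
    have := scanUp_not d f2 x h2
    simp_all

-- scanDown specs (mirror)
theorem scanDown_le (d : PySem.Dict Int (List Int)) (f : Nat) (x : Int) : scanDown d f x ≤ x := by
  induction f generalizing x with
  | zero => simp [scanDown]
  | succ f ih =>
    simp only [scanDown]
    split
    · have := ih (x-1); omega
    · omega
theorem scanDown_ge (d : PySem.Dict Int (List Int)) (f : Nat) (x : Int) : x - f ≤ scanDown d f x := by
  induction f generalizing x with
  | zero => simp [scanDown]
  | succ f ih =>
    simp only [scanDown]
    split
    · have := ih (x-1); push_cast at *; omega
    · push_cast; omega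
theorem scanDown_mem (d : PySem.Dict Int (List Int)) (f : Nat) (x y : Int)
    (h1 : y ≤ x) (h2 : scanDown d f x < y) : d.contains y = true := by
  induction f generalizing x with
  | zero => simp [scanDown] at h2; omega
  | succ f ih =>
    simp only [scanDown] at h2
    split at h2
    · rcases eq_or_lt_of_le h1 with rfl | h
      · assumption
      · exact ih (x-1) (by omega) h2
    · omega
theorem scanDown_not (d : PySem.Dict Int (List Int)) (f : Nat) (x : Int)
    (h : x - f < scanDown d f x) : d.contains (scanDown d f x) = false := by
  induction f generalizing x with
  | zero => simp [scanDown] at h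
  | succ f ih =>
    by_cases hc : d.contains x
    · rw [scanDown, if_pos hc] at h ⊢
      exact ih (x-1) (by push_cast at h ⊢; omega)
    · rw [scanDown, if_neg hc]
      simpa using hc
theorem scanDown_lt'' (d : PySem.Dict Int (List Int)) (L : List Int)
    (hL : ∀ y, d.contains y = true → y ∈ L) (x : Int) :
    x - (L.length + 1) < scanDown d (L.length + 1) x := by
  by_contra hlt
  push_neg at hlt
  have hge := scanDown_ge d (L.length + 1) x
  have heq : scanDown d (L.length + 1) x = x - ((L.length : Int) + 1) := by push_cast at hge ⊢; omega
  have hsub : PySem.List.pyRange (x - (L.length : Int)) (x + 1) 1 ⊆ L := by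
    intro y hy
    rw [PySem.List.mem_pyRange_one] at hy
    exact hL y (scanDown_mem d (L.length + 1) x y (by omega) (by rw [heq]; omega))
  have hlen := ((PySem.List.nodup_pyRange_one (x - (L.length : Int)) (x + 1)).subperm hsub).length_le
  rw [PySem.List.length_pyRange_one] at hlen
  omega
theorem scanDown_unique (d : PySem.Dict Int (List Int)) (f1 f2 : Nat) (x : Int)
    (h1 : x - f1 < scanDown d f1 x) (h2 : x - f2 < scanDown d f2 x) :
    scanDown d f1 x = scanDown d f2 x := by
  rcases lt_trichotomy (scanDown d f1 x) (scanDown d f2 x) with h | h | h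
  · have := scanDown_mem d f1 x _ (scanDown_le d f2 x) h
    have := scanDown_not d f2 x h2
    simp_all
  · exact h
  · have := scanDown_mem d f2 x _ (scanDown_le d f1 x) h
    have := scanDown_not d f1 x h1
    simp_all

-- A's list-building while loops, described by scanUp/scanDown endpoints
theorem whileUpA_eq (xs : List Int) (d : PySem.Dict Int (List Int))
    (H : ∀ y, d.contains y = decide (y ∈ xs)) (f : Nat) (x : Int) (acc : List Int) :
    whileUpA xs f x acc = acc ++ PySem.List.pyRange x (scanUp d f x) 1 := by
  induction f generalizing x acc with
  | zero => simp [whileUpA, scanUp, PySem.List.pyRange_one_eq_nil (le_refl x)]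
  | succ f ih =>
    by_cases hc : x ∈ xs
    · rw [whileUpA, if_pos hc, scanUp, if_pos (by rw [H]; simpa using hc), ih]
      have h1 := scanUp_ge d f (x+1)
      rw [PySem.List.pyRange_one_cons (show x < scanUp d f (x+1) by omega)]
      simp
    · rw [whileUpA, if_neg hc, scanUp, if_neg (by rw [H]; simpa using hc),
        PySem.List.pyRange_one_eq_nil (le_refl x)]
      simp

theorem whileDownA_eq (xs : List Int) (d : PySem.Dict Int (List Int))
    (H : ∀ y, d.contains y = decide (y ∈ xs)) (f : Nat) (x : Int) (acc : List Int) :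
    whileDownA xs f x acc = acc ++ (PySem.List.pyRange (scanDown d f x + 1) (x + 1) 1).reverse := by
  induction f generalizing x acc with
  | zero => simp [whileDownA, scanDown, PySem.List.pyRange_one_eq_nil (by omega : x + 1 ≤ x + 1)]
  | succ f ih =>
    by_cases hc : x ∈ xs
    · rw [whileDownA, if_pos hc, scanDown, if_pos (by rw [H]; simpa using hc), ih]
      have h1 := scanDown_le d f (x-1)
      have h2 : x - 1 + 1 = x := by omega
      rw [h2, show x + 1 = (x - 1 + 1) + 1 by omega,
        PySem.List.pyRange_one_succ_right (show scanDown d f (x-1) + 1 ≤ x - 1 + 1 by omega)]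
      simp
    · rw [whileDownA, if_neg hc, scanDown, if_neg (by rw [H]; simpa using hc),
        PySem.List.pyRange_one_eq_nil (by omega : x + 1 ≤ x + 1)]
      simp

theorem eq_nil_congr (l1 l2 : List Int) (h : ∀ y, y ∈ l1 ↔ y ∈ l2) : l1 = [] ↔ l2 = [] := by
  constructor <;> intro h' <;> rw [List.eq_nil_iff_forall_not_mem] at h' ⊢
  · exact fun y hy => h' y ((h y).mpr hy)
  · exact fun y hy => h' y ((h y).mp hy)

-- cyclic_width only depends on the set of ys
theorem cyclic_width_congr (l1 l2 : List Int) (N : Int) (h : ∀ y, y ∈ l1 ↔ y ∈ l2) :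
    cyclic_width l1 N = cyclic_width_alt l2 N := by
  have hs : PySem.List.sorted (PySem.Set.ofList l1) (fun v => v) false
      = PySem.List.sorted (PySem.Set.ofList l2) (fun v => v) false :=
    PySem.List.sorted_eq_sorted_of_perm _ _ _ (fun a b hab => hab)
      ((List.perm_ext_iff_of_nodup (PySem.Set.nodup_ofList _) (PySem.Set.nodup_ofList _)).mpr
        (fun a => by rw [PySem.Set.mem_ofList, PySem.Set.mem_ofList]; exact h a))
  by_cases h1 : l1 = []
  · have h2 : l2 = [] := (eq_nil_congr l1 l2 h).mp h1
    simp [cyclic_width, cyclic_width_alt, h1, h2]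
  · have h2 : l2 ≠ [] := fun he => h1 ((eq_nil_congr l1 l2 h).mpr he)
    simp only [cyclic_width, cyclic_width_alt, if_neg h1, if_neg h2, hs]

-- min?/max? with identity key only depend on membership
theorem min?_congr (l1 l2 : List Int) (h : ∀ y, y ∈ l1 ↔ y ∈ l2) :
    PySem.List.min? l1 (fun v => v) = PySem.List.min? l2 (fun v => v) := by
  by_cases h1 : l1 = []
  · have h2 : l2 = [] := (eq_nil_congr l1 l2 h).mp h1
    rw [h1, h2]
  · have h2 : l2 ≠ [] := fun he => h1 ((eq_nil_congr l1 l2 h).mpr he)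
    cases hm1 : PySem.List.min? l1 (fun v => v) with
    | none => exact absurd ((PySem.List.min?_eq_none_iff _ _).mp hm1) h1
    | some m1 =>
      cases hm2 : PySem.List.min? l2 (fun v => v) with
      | none => exact absurd ((PySem.List.min?_eq_none_iff _ _).mp hm2) h2
      | some m2 =>
        have e1 : m1 ≤ m2 := PySem.List.min?_isMin hm1 m2 ((h m2).mpr (PySem.List.min?_mem hm2))
        have e2 : m2 ≤ m1 := PySem.List.min?_isMin hm2 m1 ((h m1).mp (PySem.List.min?_mem hm1))
        rw [le_antisymm e1 e2]
theorem max?_congr (l1 l2 : List Int) (h : ∀ y, y ∈ l1 ↔ y ∈ l2) :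
    PySem.List.max? l1 (fun v => v) = PySem.List.max? l2 (fun v => v) := by
  by_cases h1 : l1 = []
  · have h2 : l2 = [] := (eq_nil_congr l1 l2 h).mp h1
    rw [h1, h2]
  · have h2 : l2 ≠ [] := fun he => h1 ((eq_nil_congr l1 l2 h).mpr he)
    cases hm1 : PySem.List.max? l1 (fun v => v) with
    | none => exact absurd ((PySem.List.max?_eq_none_iff _ _).mp hm1) h1
    | some m1 =>
      cases hm2 : PySem.List.max? l2 (fun v => v) with
      | none => exact absurd ((PySem.List.max?_eq_none_iff _ _).mp hm2) h2
      | some m2 =>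
        have e1 : m2 ≤ m1 := PySem.List.max?_isMax hm1 m2 ((h m2).mpr (PySem.List.max?_mem hm2))
        have e2 : m1 ≤ m2 := PySem.List.max?_isMax hm2 m1 ((h m1).mp (PySem.List.max?_mem hm1))
        rw [le_antisymm e2 e1]

-- ===== VERDICT (by name: the statement is the Claim_ definition above) =====
theorem get_satellite_block_info_spec : Claim_equal_get_satellite_block_info := by
  intro sats P N _ hPre
  obtain ⟨hs, hN⟩ := hPre
  unfold Spec_get_satellite_block_info
  simp only [get_satellite_block_info, get_satellite_block_info_alt]
  set xs := sats.map (fun sid => PySem.Int.floordiv sid N) with hxs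
  set pairs := sats.map (fun sid => (PySem.Int.floordiv sid N, PySem.Int.mod sid N)) with hpairs
  set idx := pairs.foldl (fun d p => d.modify p.1 [] (fun v => v ++ [p.2])) PySem.Dict.empty with hidx
  have hxs_ne : xs ≠ [] := by simpa [hxs] using hs
  have hkeys : idx.keys = PySem.Set.ofList xs := by
    rw [hidx, hpairs, PySem.Dict.keys_foldl_modify_key]
    simp [PySem.Set.update, PySem.Set.ofList_eq_foldl, List.map_map, Function.comp_def, hxs]
  have Hkm : ∀ y, (y ∈ idx.keys) ↔ y ∈ xs := by
    intro y; rw [hkeys]; exact PySem.Set.mem_ofList xs y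
  have Hc : ∀ y, idx.contains y = decide (y ∈ xs) := by
    intro y; rw [PySem.Dict.contains_eq_decide_mem_keys]; simp [Hkm y]
  obtain ⟨a, ha⟩ : ∃ a, PySem.List.min? xs (fun v => v) = some a := by
    cases hm : PySem.List.min? xs (fun v => v) with
    | none => exact absurd ((PySem.List.min?_eq_none_iff _ _).mp hm) hxs_ne
    | some m => exact ⟨m, rfl⟩
  obtain ⟨b, hb⟩ : ∃ b, PySem.List.max? xs (fun v => v) = some b := by
    cases hm : PySem.List.max? xs (fun v => v) with
    | none => exact absurd ((PySem.List.max?_eq_none_iff _ _).mp hm) hxs_ne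
    | some m => exact ⟨m, rfl⟩
  have ha' : PySem.List.min? idx.keys (fun v => v) = some a := by
    rw [min?_congr idx.keys xs Hkm, ha]
  have hb' : PySem.List.max? idx.keys (fun v => v) = some b := by
    rw [max?_congr idx.keys xs Hkm, hb]
  rw [ha, hb, ha', hb']
  dsimp only
  by_cases hcond : a = 0 ∧ b = P - 1
  · rw [if_pos hcond, if_pos hcond]
    obtain ⟨ha0, hbP⟩ := hcond
    subst ha0
    have hsz : PySem.Dict.size idx = idx.keys.length := by simp [PySem.Dict.size, PySem.Dict.keys]
    have hLxs : ∀ y, idx.contains y = true → y ∈ xs := fun y hy => by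
      rw [Hc] at hy; simpa using hy
    have hLk : ∀ y, idx.contains y = true → y ∈ idx.keys := fun y hy => by
      rw [PySem.Dict.contains_eq_decide_mem_keys] at hy; simpa using hy
    have hfx := scanUp_lt'' idx xs hLxs 0
    have hfk := scanUp_lt'' idx idx.keys hLk 0
    have hkk : scanUp idx (PySem.Dict.size idx + 1) 0 = scanUp idx (xs.length + 1) 0 := by
      rw [hsz]; exact scanUp_unique idx (idx.keys.length+1) (xs.length+1) 0 hfk hfx
    have hgx := scanDown_lt'' idx xs hLxs b
    have hgk := scanDown_lt'' idx idx.keys hLk b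
    have hjj : scanDown idx (PySem.Dict.size idx + 1) b = scanDown idx (xs.length + 1) b := by
      rw [hsz]; exact scanDown_unique idx (idx.keys.length+1) (xs.length+1) b hgk hgx
    rw [hkk, hjj, whileUpA_eq xs idx Hc, whileDownA_eq xs idx Hc]
    simp only [List.nil_append]
    -- facts about the endpoints K and J
    have h0mem : (0:Int) ∈ xs := PySem.List.min?_mem ha
    have hbmem : b ∈ xs := PySem.List.max?_mem hb
    have hKpos : 0 < scanUp idx (xs.length + 1) 0 := by
      rcases eq_or_lt_of_le (scanUp_ge idx (xs.length+1) 0) with h | h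
      · exfalso
        have := scanUp_not idx (xs.length+1) 0 hfx
        rw [← h, Hc] at this
        simp [h0mem] at this
      · exact h
    have hKmem : ∀ y, 0 ≤ y → y < scanUp idx (xs.length + 1) 0 → y ∈ xs := fun y h1 h2 =>
      hLxs y (scanUp_mem idx (xs.length+1) 0 y h1 h2)
    have hKnot : scanUp idx (xs.length + 1) 0 ∉ xs := by
      have := scanUp_not idx (xs.length+1) 0 hfx
      rw [Hc] at this
      simpa using this
    have hJle : scanDown idx (xs.length + 1) b ≤ b := scanDown_le idx (xs.length+1) b
    have hJnot : scanDown idx (xs.length + 1) b ∉ xs := by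
      have := scanDown_not idx (xs.length+1) b hgx
      rw [Hc] at this
      simpa using this
    have hJlt : scanDown idx (xs.length + 1) b < b := by
      rcases eq_or_lt_of_le hJle with h | h
      · rw [h] at hJnot; exact absurd hbmem hJnot
      · exact h
    have hJmem : ∀ y, y ≤ b → scanDown idx (xs.length + 1) b < y → y ∈ xs := fun y h1 h2 =>
      hLxs y (scanDown_mem idx (xs.length+1) b y h1 h2)
    have hgetD : ∀ c, idx.getD c [] = (pairs.filter (fun p => p.1 == c)).map (fun p => p.2) := by
      intro c
      rw [hidx]
      simpa using PySem.Dict.getD_foldl_modify_append pairs PySem.Dict.empty c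
    -- abbreviate endpoints
    generalize hKg : scanUp idx (xs.length + 1) 0 = K at *
    generalize hJg : scanDown idx (xs.length + 1) b = J at *
    -- nonemptiness of the two group lists
    have hne1 : PySem.List.pyRange 0 K 1 ≠ [] := by
      rw [PySem.List.pyRange_one_cons hKpos]; simp
    have hne2 : (PySem.List.pyRange (J+1) (b+1) 1).reverse ≠ [] := by
      rw [PySem.List.pyRange_one_cons (show J+1 < b+1 by omega)]; simp
    rw [if_pos hne1, if_pos hne2]
    -- the four index computations
    have e2 : PySem.List.pyGetD (PySem.List.pyRange 0 K 1) 0 0 = 0 := by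
      rw [PySem.List.pyRange_one_cons hKpos, PySem.List.pyGetD_zero_cons]
    have e1 : PySem.List.pyGetD (PySem.List.pyRange 0 K 1) (-1) 0 = K - 1 := by
      rw [show PySem.List.pyRange 0 K 1 = PySem.List.pyRange 0 (K-1+1) 1 by rw [show K-1+1 = K by omega],
        PySem.List.pyRange_one_succ_right (by omega), PySem.List.pyGetD_neg_one_append_singleton]
    have f1 : PySem.List.pyGetD (PySem.List.pyRange (J+1) (b+1) 1).reverse 0 0 = b := by
      rw [PySem.List.pyRange_one_succ_right (show J+1 ≤ b by omega)]
      simp only [List.reverse_append, List.reverse_cons, List.reverse_nil, List.nil_append,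
        List.singleton_append, PySem.List.pyGetD_zero_cons]
    have f2 : PySem.List.pyGetD (PySem.List.pyRange (J+1) (b+1) 1).reverse (-1) 0 = J + 1 := by
      rw [PySem.List.pyRange_one_cons (show J+1 < b+1 by omega), List.reverse_cons,
        PySem.List.pyGetD_neg_one_append_singleton]
    rw [e1, e2, f1, f2]
    -- widths agree: both lists carry the same set of ys
    simp only [List.cons.injEq, Prod.mk.injEq, Option.some.injEq, and_true]
    refine ⟨⟨by omega, ?_⟩, by omega, ?_⟩
    · apply cyclic_width_congr
      intro y
      rw [PySem.List.foldl_append_eq_flatMap]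
      simp only [List.nil_append, List.mem_flatMap, List.mem_map, List.mem_filter, hgetD,
        PySem.List.mem_pyRange_one, hpairs, decide_eq_true_eq, beq_iff_eq]
      constructor
      · rintro ⟨sid, ⟨hsid, h1, h2⟩, rfl⟩
        exact ⟨PySem.Int.floordiv sid N, ⟨h1, h2⟩, ⟨(PySem.Int.floordiv sid N, PySem.Int.mod sid N), ⟨⟨sid, hsid, rfl⟩, rfl⟩, rfl⟩⟩
      · rintro ⟨x, ⟨h1, h2⟩, ⟨p, ⟨⟨sid, hsid, rfl⟩, hx⟩, rfl⟩⟩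
        dsimp only at hx
        subst hx
        exact ⟨sid, ⟨hsid, h1, h2⟩, rfl⟩
    · apply cyclic_width_congr
      intro y
      rw [PySem.List.foldl_append_eq_flatMap]
      simp only [List.nil_append, List.mem_flatMap, List.mem_map, List.mem_filter, hgetD,
        List.mem_reverse, PySem.List.mem_pyRange_one, hpairs, decide_eq_true_eq, beq_iff_eq]
      constructor
      · rintro ⟨sid, ⟨hsid, h1, h2⟩, rfl⟩
        exact ⟨PySem.Int.floordiv sid N, ⟨h1, h2⟩, ⟨(PySem.Int.floordiv sid N, PySem.Int.mod sid N), ⟨⟨sid, hsid, rfl⟩, rfl⟩, rfl⟩⟩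
      · rintro ⟨x, ⟨h1, h2⟩, ⟨p, ⟨⟨sid, hsid, rfl⟩, hx⟩, rfl⟩⟩
        dsimp only at hx
        subst hx
        exact ⟨sid, ⟨hsid, h1, h2⟩, rfl⟩
  · rw [if_neg hcond, if_neg hcond]
    simp only [hpairs, List.map_map, Function.comp_def, Option.getD_some, List.cons.injEq,
      Prod.mk.injEq, Option.some.injEq, and_true]
    exact ⟨trivial, cyclic_width_congr _ _ N (fun y => Iff.rfl)⟩
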